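-- pv_equiv track=rewrite | github.com/canonical/oci-factory | src/shared/release_info.py | _find_alias_revision
-- ===== SOURCE A (Python) =====
-- class BadChannel(Exception):
--     """Error validating release channel."""
--
-- def _find_alias_revision(tag_mapping_from_all_releases: dict, rev: str, visited: set, tag: str) -> str:
--     if rev in visited:
--         raise BadChannel(
--             f"Tag {tag} was caught in a circular dependency, "
--             "following tags that follow themselves. Cannot pin a revision."
--         )
--     visited.add(rev)
--     if not rev.isdigit():
--         return _find_alias_revision(
--             tag_mapping_from_all_releases, tag_mapping_from_all_releases[rev], visited, tag
--         )
--     return rev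
-- ===== SOURCE B (Python) =====
-- class BadChannel(Exception):
--     """Error validating release channel."""
--
-- def _find_alias_revision(tag_mapping_from_all_releases: dict, rev: str, visited: set, tag: str) -> str:
--     # Follow the mapping while accumulating the path; the BadChannel check happens
--     # once, after the loop, on the element the loop stopped at.
--     path = [rev]
--     cur = rev
--     while (not cur.isdigit()) and (cur not in visited) and (cur not in path[:-1]):
--         cur = tag_mapping_from_all_releases[cur]
--         path.append(cur)
--     if cur in visited or cur in path[:-1]:
--         raise BadChannel(
--             f"Tag {tag} was caught in a circular dependency, "
--             "following tags that follow themselves. Cannot pin a revision."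
--         )
--     visited.update(path)
--     return cur
-- ===== Notes on version B (the rewrite author's own statement) =====
-- stated objective: alternative
-- what changed: Recursion threading a mutable visited set is replaced by a loop that follows the mapping while accumulating the path in a list, with a single post-loop BadChannel check against visited and the path prefix, committing the path to visited once at the end.
import Mathlib
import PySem

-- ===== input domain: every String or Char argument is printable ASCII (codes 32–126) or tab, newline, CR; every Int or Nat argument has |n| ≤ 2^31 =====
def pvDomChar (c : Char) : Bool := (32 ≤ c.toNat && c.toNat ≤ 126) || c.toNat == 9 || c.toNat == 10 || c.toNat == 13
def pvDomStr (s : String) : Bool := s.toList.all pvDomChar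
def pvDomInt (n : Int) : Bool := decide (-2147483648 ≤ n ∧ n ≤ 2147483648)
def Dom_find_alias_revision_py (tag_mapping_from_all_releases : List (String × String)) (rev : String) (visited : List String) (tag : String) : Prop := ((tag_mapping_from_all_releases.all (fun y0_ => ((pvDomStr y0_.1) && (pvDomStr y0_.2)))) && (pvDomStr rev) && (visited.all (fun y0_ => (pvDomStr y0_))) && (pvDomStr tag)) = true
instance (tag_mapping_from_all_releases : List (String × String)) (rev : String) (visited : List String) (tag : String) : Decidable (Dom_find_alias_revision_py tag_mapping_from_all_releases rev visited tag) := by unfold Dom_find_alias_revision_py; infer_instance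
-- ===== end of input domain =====

-- B replaces A's recursion threading a mutable visited set by a loop that follows the
-- mapping while accumulating the path list, with a single post-loop BadChannel check
-- (alternative decomposition, same cost). Equivalence is about the RETURN value only;
-- on inputs where both return, B leaves `visited` in the same final state as A.

-- dict lookup (first match) shared by both ports and by Pre_
def pvLookup (m : List (String × String)) (k : String) : Option String :=
  (m.find? (fun p => p.1 == k)).map (·.2)

-- ===== PORT A =====
-- A's recursion, with fuel m.length+1 (always enough inside Pre_); none = raise (BadChannel / KeyError)
def goA (m : List (String × String)) : Nat → String → PySem.Set String → Option String
  | 0, _, _ => none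
  | fuel+1, rev, visited =>
    if PySem.Set.contains visited rev then none          -- raise BadChannel
    else
      let visited := PySem.Set.add visited rev
      if ¬ PySem.Str.strIsdigit rev then
        match pvLookup m rev with
        | none => none                                   -- KeyError
        | some nxt => goA m fuel nxt visited
      else some rev

def find_alias_revision_py (tag_mapping_from_all_releases : List (String × String)) (rev : String) (visited : List String) (tag : String) : String :=
  (goA tag_mapping_from_all_releases (tag_mapping_from_all_releases.length + 1) rev (PySem.Set.ofList visited)).getD ""

-- ===== PORT B =====
-- B's while-loop: keeps the path as a plain list and reads the stop/duplicate conditions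
-- off it (Python's path[:-1] is List.dropLast, exact for every list); none = raise (KeyError
-- mid-loop, or fuel out which Pre_ rules out). The post-loop BadChannel check is in _alt.
def goB (m : List (String × String)) : Nat → String → List String → List String → Option (String × List String)
  | 0, _, _, _ => none
  | fuel+1, cur, vis, path =>
    if !(PySem.Str.strIsdigit cur) && !(vis.contains cur) && !(path.dropLast.contains cur) then
      match pvLookup m cur with
      | none => none                                     -- KeyError
      | some nxt => goB m fuel nxt vis (path ++ [nxt])
    else some (cur, path)

def find_alias_revision_py_alt (tag_mapping_from_all_releases : List (String × String)) (rev : String) (visited : List String) (tag : String) : String :=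
  match goB tag_mapping_from_all_releases (tag_mapping_from_all_releases.length + 1) rev visited [rev] with
  | none => ""
  | some (cur, path) =>
    if visited.contains cur || path.dropLast.contains cur then ""   -- raise BadChannel
    else cur

-- ===== PRECONDITION & SPEC =====
def pvStep (m : List (String × String)) (s : String) : String := (pvLookup m s).getD s

-- Pre_ excludes exactly the inputs on which Python A raises (BadChannel on a revisited tag
-- or cycle, KeyError on a missing mapping key): the alias chain from rev must reach a digit
-- string through distinct, unvisited, mapped non-digit tags.
def Pre_find_alias_revision_py (tag_mapping_from_all_releases : List (String × String)) (rev : String) (visited : List String) (tag : String) : Prop :=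
  ∃ n : Nat, n < tag_mapping_from_all_releases.length + 1 ∧
    PySem.Str.strIsdigit ((pvStep tag_mapping_from_all_releases)^[n] rev) = true ∧
    (∀ i < n, PySem.Str.strIsdigit ((pvStep tag_mapping_from_all_releases)^[i] rev) = false ∧
              (pvLookup tag_mapping_from_all_releases ((pvStep tag_mapping_from_all_releases)^[i] rev)).isSome = true) ∧
    (∀ i ≤ n, (pvStep tag_mapping_from_all_releases)^[i] rev ∉ visited) ∧
    (∀ i ≤ n, ∀ j < i, (pvStep tag_mapping_from_all_releases)^[i] rev ≠ (pvStep tag_mapping_from_all_releases)^[j] rev)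
instance (tag_mapping_from_all_releases : List (String × String)) (rev : String) (visited : List String) (tag : String) : Decidable (Pre_find_alias_revision_py tag_mapping_from_all_releases rev visited tag) := by unfold Pre_find_alias_revision_py; infer_instance

def pvWitness_find_alias_revision_py : (List (String × String)) × String × List String × String :=
  ([("edge", "10")], "edge", [], "edge")

def Spec_find_alias_revision_py (tag_mapping_from_all_releases : List (String × String)) (rev : String) (visited : List String) (tag : String) (out : String) : Prop := out = find_alias_revision_py_alt tag_mapping_from_all_releases rev visited tag
instance (tag_mapping_from_all_releases : List (String × String)) (rev : String) (visited : List String) (tag : String) (out : String) : Decidable (Spec_find_alias_revision_py tag_mapping_from_all_releases rev visited tag out) := by unfold Spec_find_alias_revision_py; infer_instance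

-- ===== CLAIM (what is proved, stated in full; the proofs are below) =====
def Claim_equal_find_alias_revision_py : Prop := ∀ (tag_mapping_from_all_releases : List (String × String)) (rev : String) (visited : List String) (tag : String), Dom_find_alias_revision_py tag_mapping_from_all_releases rev visited tag → Pre_find_alias_revision_py tag_mapping_from_all_releases rev visited tag → Spec_find_alias_revision_py tag_mapping_from_all_releases rev visited tag (find_alias_revision_py tag_mapping_from_all_releases rev visited tag)

-- ===== LEMMAS AND PROOFS =====

theorem mem_foldl_add (c : List String) (S : PySem.Set String) (x : String) :
    x ∈ List.foldl PySem.Set.add S c ↔ x ∈ S ∨ x ∈ c := by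
  induction c generalizing S with
  | nil => simp
  | cons y ys ih =>
    simp [List.foldl, ih, PySem.Set.mem_add]
    tauto

-- B's post-loop check applied to goB's result equals goA's result, when goB's path
-- is c ++ [cur] and goA's visited is the caller's set extended by c.
theorem goAB (m : List (String × String)) (vis : List String) :
    ∀ (fuel : Nat) (cur : String) (c : List String),
      (match goB m fuel cur vis (c ++ [cur]) with
        | none => none
        | some (r, p) => if vis.contains r || p.dropLast.contains r then none else some r)
      = goA m fuel cur (List.foldl PySem.Set.add (PySem.Set.ofList vis) c) := by
  intro fuel
  induction fuel with
  | zero => intro cur c; simp [goA, goB]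
  | succ f ih =>
    intro cur c
    by_cases h1 : cur ∈ vis ∨ cur ∈ c
    · simp only [goB]
      split_ifs with hcond
      · simp at hcond; tauto
      · have hA : PySem.Set.contains (List.foldl PySem.Set.add (PySem.Set.ofList vis) c) cur = true := by
          simp [PySem.Set.contains, mem_foldl_add, PySem.Set.mem_ofList]; tauto
        simp [goA, mem_foldl_add, PySem.Set.mem_ofList, h1]
    · push Not at h1
      by_cases hd : PySem.Chars.strIsdigit cur.toList = true
      · simp [goA, goB, PySem.Set.contains, mem_foldl_add, PySem.Set.mem_ofList, h1, hd]
      · have hfold : List.foldl PySem.Set.add (PySem.Set.ofList vis) (c ++ [cur]) =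
            PySem.Set.add (List.foldl PySem.Set.add (PySem.Set.ofList vis) c) cur := by
          simp [List.foldl_append]
        cases hpv : pvLookup m cur with
        | none =>
          simp [goA, goB, PySem.Set.contains, mem_foldl_add, PySem.Set.mem_ofList, h1, hd, hpv]
        | some nxt =>
          have := ih nxt (c ++ [cur])
          rw [hfold] at this
          simpa [goA, goB, PySem.Set.contains, mem_foldl_add, PySem.Set.mem_ofList, h1,
                 List.dropLast_concat, hd, hpv, List.append_assoc] using this

-- ===== VERDICT (by name: the statement is the Claim_ definition above) =====
theorem find_alias_revision_py_spec : Claim_equal_find_alias_revision_py := by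
  intro m rev visited tag _ _
  unfold Spec_find_alias_revision_py find_alias_revision_py find_alias_revision_py_alt
  have h := goAB m visited (m.length + 1) rev []
  simp only [List.foldl_nil, List.nil_append] at h
  cases hb : goB m (m.length + 1) rev visited [rev] with
  | none => rw [hb] at h; simp [← h]
  | some pr =>
    rw [hb] at h
    obtain ⟨r, p⟩ := pr
    rw [← h]
    by_cases hP : r ∈ visited ∨ r ∈ p.dropLast
    · simp [hP]
    · simp [hP]
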